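-- pv_equiv track=rewrite | github.com/kazSgw/tiny_codes | count0abj.py | getFaceAmount
-- ===== SOURCE A (Python) =====
-- def getFaceAmount(lst): # lst must be a STRING list
--     amount = 0
--
--     for i in range(10):
--         child_lst = [x for x in lst if str(i)==x[0] ]
--         if not child_lst:
--             continue
--         elif len(child_lst[0]) == 2:
--             amount += 1
--         else:
--             amount += getFaceAmount( [ x[1:] for x in child_lst ] )
--
--     return amount + 1
-- ===== SOURCE B (Python) =====
-- def getFaceAmount(lst): # lst must be a STRING list
--     def count(group, d):
--         # strings that continue with a digit at position d (s[d] raises where A raises)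
--         pending = [s for s in group if s[d].isdigit()]
--         total = 1
--         while pending:
--             c = pending[0][d]
--             same = [s for s in pending if s[d] == c]
--             pending = [s for s in pending if s[d] != c]
--             if len(same[0]) == d + 2:
--                 total += 1
--             else:
--                 total += count(same, d + 1)
--         return total
--     return count(lst, 0)
-- ===== Notes on version B (the rewrite author's own statement) =====
-- stated objective: faster
-- what changed: A rescans the whole list ten times per level and rebuilds every string with x[1:] slices at each recursion step; B never slices: it keeps whole strings with a character index offset d and partitions the remaining group by the character actually present at offset d, recursing on each partition.
import Mathlib
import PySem

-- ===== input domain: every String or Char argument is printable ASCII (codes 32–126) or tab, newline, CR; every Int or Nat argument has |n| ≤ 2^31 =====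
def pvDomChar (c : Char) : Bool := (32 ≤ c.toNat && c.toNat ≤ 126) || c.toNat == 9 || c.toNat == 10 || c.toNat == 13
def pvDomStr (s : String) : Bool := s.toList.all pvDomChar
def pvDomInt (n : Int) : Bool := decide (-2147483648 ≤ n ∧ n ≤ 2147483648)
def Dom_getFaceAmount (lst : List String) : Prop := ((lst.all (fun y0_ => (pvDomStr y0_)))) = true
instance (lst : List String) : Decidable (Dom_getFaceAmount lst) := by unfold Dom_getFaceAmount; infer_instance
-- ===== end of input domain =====

-- B replaces A's ten per-digit rescans with repeated string slicing by partition-based grouping on a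
-- character index offset (no slices are ever built); equivalence is about the return value.

-- ===== PORT A =====
-- strings are handled as their code-point lists (PySem.Chars convention);
-- the lemmas in this section are cited by the ports' decreasing_by blocks
def pvSumLen (l : List (List Char)) : Nat := (l.map List.length).sum

def pvChildA (i : Int) (lst : List (List Char)) : List (List Char) :=
  lst.filter (fun x =>
    match PySem.List.pyGet? x 0 with
    | some ch => PySem.Int.toChars i == [ch]
    | none => false)

lemma pvSumLen_filter_le (p : List Char → Bool) (l : List (List Char)) :
    pvSumLen (l.filter p) ≤ pvSumLen l := by
  induction l with
  | nil => simp [pvSumLen]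
  | cons x t ih =>
    simp only [List.filter_cons]
    split <;> simp [pvSumLen, List.sum_cons] at ih ⊢ <;> omega

lemma pvChildA_mem_ne_nil {i : Int} {lst : List (List Char)} {x : List Char}
    (hx : x ∈ pvChildA i lst) : x ≠ [] := by
  have := List.of_mem_filter hx
  intro h; subst h; simp [PySem.List.pyGet?] at this

lemma pvSumLen_tail_lt (l : List (List Char)) (h : l ≠ []) (h2 : ∀ x ∈ l, x ≠ []) :
    pvSumLen (l.map List.tail) < pvSumLen l := by
  induction l with
  | nil => simp at h
  | cons x t ih =>
    have hx : x ≠ [] := h2 x (by simp)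
    have hlen : 1 ≤ x.length := by cases x <;> simp_all
    rcases t with _ | ⟨y, t'⟩
    · simp [pvSumLen, List.length_tail]; omega
    · have := ih (by simp) (fun z hz => h2 z (by simp [hz]))
      simp [pvSumLen, List.length_tail] at this ⊢
      omega

lemma pvSumLen_childA_slice_lt (i : Int) (lst : List (List Char))
    (h : pvChildA i lst ≠ []) :
    pvSumLen ((pvChildA i lst).map (fun x => PySem.List.slice x (some 1) none)) < pvSumLen lst := by
  have h1 : ∀ x ∈ pvChildA i lst, x ≠ [] := fun x hx => pvChildA_mem_ne_nil hx
  have h2 : pvSumLen ((pvChildA i lst).map List.tail) < pvSumLen (pvChildA i lst) :=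
    pvSumLen_tail_lt _ h h1
  have h3 : pvSumLen (pvChildA i lst) ≤ pvSumLen lst := pvSumLen_filter_le _ _
  calc pvSumLen ((pvChildA i lst).map (fun x => PySem.List.slice x (some 1) none))
      = pvSumLen ((pvChildA i lst).map List.tail) := by
        simp [PySem.List.slice_from_one]
    _ < pvSumLen lst := lt_of_lt_of_le h2 h3

mutual
  def pvGfaALoop (lst : List (List Char)) (digits : List Int) (amount : Int) : Int :=
    match digits with
    | [] => amount + 1
    | i :: rest =>
      match h : pvChildA i lst with
      | [] => pvGfaALoop lst rest amount
      | c0 :: _ =>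
        if c0.length == 2 then pvGfaALoop lst rest (amount + 1)
        else pvGfaALoop lst rest
          (amount + pvGfaA ((pvChildA i lst).map (fun x => PySem.List.slice x (some 1) none)))
  termination_by pvSumLen lst * 12 + digits.length
  decreasing_by
    · simp only [List.length_cons]; omega
    · simp only [List.length_cons]; omega
    · have := pvSumLen_childA_slice_lt i lst (by rw [h]; simp)
      simp only [List.length_cons]; omega
    · simp only [List.length_cons]; omega

  def pvGfaA (lst : List (List Char)) : Int :=
    pvGfaALoop lst (PySem.List.pyRange 0 10 1) 0
  termination_by pvSumLen lst * 12 + 11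
  decreasing_by
    · have : (PySem.List.pyRange 0 10 1).length = 10 := by decide
      omega
end

-- ===== PORT B =====
def pvPending (group : List (List Char)) (d : Nat) : List (List Char) :=
  group.filter (fun s =>
    match PySem.List.pyGet? s (d : Int) with
    | some c => PySem.Chars.isdigit c
    | none => false)

def pvMu (l : List (List Char)) (d : Nat) : Nat := (l.map (fun s => s.length - d)).sum

lemma pvMu_filter_le (p : List Char → Bool) (l : List (List Char)) (d : Nat) :
    pvMu (l.filter p) d ≤ pvMu l d := by
  induction l with
  | nil => simp [pvMu]
  | cons x t ih =>
    simp only [List.filter_cons]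
    split <;> simp [pvMu, List.sum_cons] at ih ⊢ <;> omega

lemma pvLen_of_pyGet? {s : List Char} {d : Nat} {c : Char}
    (h : PySem.List.pyGet? s (d : Int) = some c) : d < s.length := by
  rw [PySem.List.pyGet?_natCast] at h
  exact (List.getElem?_eq_some_iff.mp h).1

-- every member of `same` has a char at d, so moving to d+1 strictly drops the measure
lemma pvMu_same_lt {pending : List (List Char)} {d : Nat} {c : Char} {p0 : List Char} {t : List (List Char)}
    (hp : pending = p0 :: t) (hc : PySem.List.pyGet? p0 (d : Int) = some c) :
    pvMu (pending.filter (fun s => PySem.List.pyGet? s (d : Int) == some c)) (d + 1) < pvMu pending d := by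
  subst hp
  have hd : d < p0.length := pvLen_of_pyGet? hc
  have hfilter : (p0 :: t).filter (fun s => PySem.List.pyGet? s (d : Int) == some c)
      = p0 :: t.filter (fun s => PySem.List.pyGet? s (d : Int) == some c) := by
    simp [List.filter_cons, hc, ← PySem.List.pyGet?_natCast]
  rw [hfilter]
  have h1 : pvMu (t.filter (fun s => PySem.List.pyGet? s (d : Int) == some c)) (d + 1)
      ≤ pvMu t d := by
    calc pvMu (t.filter (fun s => PySem.List.pyGet? s (d : Int) == some c)) (d + 1)
        ≤ pvMu t (d + 1) := pvMu_filter_le _ _ _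
      _ ≤ pvMu t d := by
          unfold pvMu
          exact List.sum_le_sum (fun s _ => by omega)
  simp only [pvMu, List.map_cons, List.sum_cons] at h1 ⊢
  omega

lemma pvMu_rest_lt {pending : List (List Char)} {d : Nat} {c : Char} {p0 : List Char} {t : List (List Char)}
    (hp : pending = p0 :: t) (hc : PySem.List.pyGet? p0 (d : Int) = some c) :
    pvMu (pending.filter (fun s => !(PySem.List.pyGet? s (d : Int) == some c))) d < pvMu pending d := by
  subst hp
  have hd : d < p0.length := pvLen_of_pyGet? hc
  have hfilter : (p0 :: t).filter (fun s => !(PySem.List.pyGet? s (d : Int) == some c))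
      = t.filter (fun s => !(PySem.List.pyGet? s (d : Int) == some c)) := by
    simp [List.filter_cons, hc, ← PySem.List.pyGet?_natCast]
  rw [hfilter]
  have h1 := pvMu_filter_le (fun s => !(PySem.List.pyGet? s (d : Int) == some c)) t d
  simp only [pvMu, List.map_cons, List.sum_cons] at h1 ⊢
  omega

mutual
  def pvGfaBLoop (pending : List (List Char)) (d : Nat) (total : Int) : Int :=
    match hp : pending with
    | [] => total
    | p0 :: _ =>
      match hc : PySem.List.pyGet? p0 (d : Int) with
      | none => total                           -- unreachable: every pending string has a char at d
      | some c =>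
        -- same = [s for s in pending if s[d] == c]; rest = [s for s in pending if s[d] != c]
        match pending.filter (fun s => PySem.List.pyGet? s (d : Int) == some c) with
        | [] => total                           -- unreachable: p0 itself has s[d] == c
        | s0 :: _ =>
          if s0.length == d + 2 then
            pvGfaBLoop (pending.filter (fun s => !(PySem.List.pyGet? s (d : Int) == some c))) d (total + 1)
          else
            pvGfaBLoop (pending.filter (fun s => !(PySem.List.pyGet? s (d : Int) == some c))) d
              (total + pvGfaB (pending.filter (fun s => PySem.List.pyGet? s (d : Int) == some c)) (d + 1))
  termination_by pvMu pending d * 2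
  decreasing_by
    · have := pvMu_rest_lt hp hc
      rw [← hp]; omega
    · have := pvMu_same_lt hp hc
      rw [← hp]; omega
    · have := pvMu_rest_lt hp hc
      rw [← hp]; omega

  def pvGfaB (group : List (List Char)) (d : Nat) : Int :=
    pvGfaBLoop (pvPending group d) d 1
  termination_by pvMu group d * 2 + 1
  decreasing_by
    · have := pvMu_filter_le (fun s =>
        match PySem.List.pyGet? s (d : Int) with
        | some c => PySem.Chars.isdigit c
        | none => false) group d
      simp only [pvPending]
      omega
end


def getFaceAmount (lst : List String) : Int := pvGfaA (lst.map String.toList)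

def getFaceAmount_alt (lst : List String) : Int := pvGfaB (lst.map String.toList) 0

-- ===== PRECONDITION & SPEC =====
-- Pre_ excludes exactly the inputs on which Python A raises IndexError (evaluating x[0] on a string
-- already exhausted by the recursive slicing): A raises iff some member y is empty, or y is all
-- digits and at every depth k < len(y) the group containing y (whose first member is the first list
-- element extending y's (k+1)-prefix) fails the length-k+2 stopping test, so y is sliced to "".
def Pre_getFaceAmount (lst : List String) : Prop :=
  ∀ y ∈ lst, y.toList ≠ [] ∧
    (y.toList.all PySem.Chars.isdigit = true →
      ∃ k < y.toList.length,
        ((lst.find? (fun x => (y.toList.take (k + 1)).isPrefixOf x.toList)).map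
          (fun x => x.toList.length)).getD 0 = k + 2)
instance (lst : List String) : Decidable (Pre_getFaceAmount lst) := by
  unfold Pre_getFaceAmount; infer_instance

def pvWitness_getFaceAmount : List String := ["12", "1a", "x"]

def Spec_getFaceAmount (lst : List String) (out : Int) : Prop := out = getFaceAmount_alt lst
instance (lst : List String) (out : Int) : Decidable (Spec_getFaceAmount lst out) := by unfold Spec_getFaceAmount; infer_instance

-- ===== CLAIM (what is proved, stated in full; the proofs are below) =====
def Claim_equal_getFaceAmount : Prop := ∀ (lst : List String), Dom_getFaceAmount lst → Pre_getFaceAmount lst → Spec_getFaceAmount lst (getFaceAmount lst)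

-- ===== LEMMAS AND PROOFS =====
-- ============ proof helpers ============
def pvDigitChar (i : Int) : Char := Char.ofNat (48 + i.toNat)

lemma pvToChars_digit : ∀ i ∈ PySem.List.pyRange 0 10 1, PySem.Int.toChars i = [pvDigitChar i] := by decide

lemma pvDigitChar_inj : ∀ i ∈ PySem.List.pyRange 0 10 1, ∀ j ∈ PySem.List.pyRange 0 10 1,
    pvDigitChar i = pvDigitChar j → i = j := by decide

lemma pvIsdigit_exists {c : Char} (h : PySem.Chars.isdigit c = true) :
    ∃ i ∈ PySem.List.pyRange 0 10 1, pvDigitChar i = c := by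
  simp only [PySem.Chars.isdigit, Bool.and_eq_true, decide_eq_true_eq] at h
  obtain ⟨h1, h2⟩ := h
  have h48 : 48 ≤ c.toNat := h1
  have h57 : c.toNat ≤ 57 := h2
  refine ⟨(c.toNat : Int) - 48, ?_, ?_⟩
  · rw [PySem.List.mem_pyRange_one]; omega
  · have harith : 48 + ((c.toNat : Int) - 48).toNat = c.toNat := by omega
    rw [pvDigitChar, harith, Char.ofNat_toNat]

-- per-digit contribution of A's loop body
def pvCA (lst : List (List Char)) (i : Int) : Int :=
  match pvChildA i lst with
  | [] => 0
  | c0 :: _ => if c0.length == 2 then 1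
               else pvGfaA ((pvChildA i lst).map (fun x => PySem.List.slice x (some 1) none))

lemma pvGfaALoop_eq (digits : List Int) : ∀ (lst : List (List Char)) (amount : Int),
    pvGfaALoop lst digits amount = amount + 1 + ((digits.map (pvCA lst)).sum) := by
  induction digits with
  | nil => intro lst amount; rw [pvGfaALoop]; simp
  | cons i rest ih =>
    intro lst amount
    rw [pvGfaALoop]
    cases h : pvChildA i lst with
    | nil => simp only [pvCA, h, List.map_cons, List.sum_cons, ih]; ring
    | cons c0 tl =>
      by_cases h2 : (c0.length == 2) = true
      · simp only [pvCA, h, h2, if_true, List.map_cons, List.sum_cons, ih]; ring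
      · rw [Bool.not_eq_true] at h2
        simp only [pvCA, h, h2, Bool.false_eq_true, if_false, List.map_cons, List.sum_cons, ih]
        ring

lemma pvGfaA_eq (lst : List (List Char)) :
    pvGfaA lst = 1 + (((PySem.List.pyRange 0 10 1).map (pvCA lst)).sum) := by
  rw [pvGfaA, pvGfaALoop_eq]; ring

-- group (by first char at offset d) on the un-sliced strings
def pvF (c : Char) (l : List (List Char)) (d : Nat) : List (List Char) :=
  l.filter (fun s => PySem.List.pyGet? s (d : Int) == some c)

lemma pvFilterFilter_of_imp {α : Type} (p q : α → Bool) (l : List α)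
    (h : ∀ a, p a = true → q a = true) : (l.filter q).filter p = l.filter p := by
  rw [List.filter_filter]
  apply List.filter_congr
  intro a _
  cases hp : p a
  · simp
  · simp [h a hp]

lemma pvSumSplit (f g : Int → Int) : ∀ (L : List Int), L.Nodup → ∀ j ∈ L, g j = 0 →
    (∀ i ∈ L, i ≠ j → f i = g i) → (L.map f).sum = f j + (L.map g).sum := by
  intro L
  induction L with
  | nil => simp
  | cons a t ih =>
    intro hnd j hj hgj hfg
    rcases List.mem_cons.mp hj with rfl | hjt
    · have ht : ∀ i ∈ t, f i = g i := by
        intro i hi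
        exact hfg i (List.mem_cons_of_mem _ hi) (fun he => ((List.nodup_cons.mp hnd).1 (he ▸ hi)))
      simp only [List.map_cons, List.sum_cons, hgj]
      have : (t.map f).sum = (t.map g).sum := by
        congr 1; exact List.map_congr_left ht
      omega
    · have ha : f a = g a := hfg a (List.mem_cons_self) (fun he => (List.nodup_cons.mp hnd).1 (he ▸ hjt))
      have := ih (List.nodup_cons.mp hnd).2 j hjt hgj
        (fun i hi hij => hfg i (List.mem_cons_of_mem _ hi) hij)
      simp only [List.map_cons, List.sum_cons, ha, this]
      ring

lemma pvGet_drop_zero (s : List Char) (d : Nat) :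
    PySem.List.pyGet? (s.drop d) 0 = PySem.List.pyGet? s (d : Int) := by
  rw [PySem.List.pyGet?_zero, PySem.List.pyGet?_natCast]
  simp [List.getElem?_drop]

lemma pvChildA_map_drop {i : Int} (hi : i ∈ PySem.List.pyRange 0 10 1)
    (group : List (List Char)) (d : Nat) :
    pvChildA i (group.map (List.drop d)) = (pvF (pvDigitChar i) group d).map (List.drop d) := by
  unfold pvChildA pvF
  rw [List.filter_map]
  congr 1
  apply List.filter_congr
  intro s _
  simp only [Function.comp]
  rw [pvGet_drop_zero, pvToChars_digit i hi]
  cases PySem.List.pyGet? s (d : Int) with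
  | none => simp
  | some ch => simp [eq_comm]

lemma pvF_pending (c : Char) (hc : PySem.Chars.isdigit c = true)
    (group : List (List Char)) (d : Nat) :
    pvF c (pvPending group d) d = pvF c group d := by
  unfold pvF pvPending
  apply pvFilterFilter_of_imp
  intro s hs
  rw [beq_iff_eq] at hs
  rw [hs]
  exact hc

lemma pvF_mem_len {c : Char} {l : List (List Char)} {d : Nat} {s : List Char}
    (hs : s ∈ pvF c l d) : d < s.length ∧ PySem.List.pyGet? s (d : Int) = some c := by
  have := List.of_mem_filter hs
  rw [beq_iff_eq] at this
  exact ⟨pvLen_of_pyGet? this, this⟩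

-- per-char contribution as B sees it (on un-sliced strings, offset d)
def pvCB (L : List (List Char)) (d : Nat) (i : Int) : Int :=
  match pvF (pvDigitChar i) L d with
  | [] => 0
  | s0 :: _ => if s0.length == d + 2 then 1
               else pvGfaA ((pvF (pvDigitChar i) L d).map (List.drop (d + 1)))

lemma pvCA_eq_pvCB {i : Int} (hi : i ∈ PySem.List.pyRange 0 10 1)
    (group : List (List Char)) (d : Nat)
    (hdig : PySem.Chars.isdigit (pvDigitChar i) = true) :
    pvCA (group.map (List.drop d)) i = pvCB (pvPending group d) d i := by
  have hslice : ((pvF (pvDigitChar i) group d).map (List.drop d)).map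
      (fun x => PySem.List.slice x (some 1) none) = (pvF (pvDigitChar i) group d).map (List.drop (d + 1)) := by
    rw [List.map_map]
    apply List.map_congr_left
    intro s _
    simp [Function.comp, PySem.List.slice_from_one, List.tail_drop]
  unfold pvCA pvCB
  rw [pvChildA_map_drop hi group d, pvF_pending _ hdig, hslice]
  cases h : pvF (pvDigitChar i) group d with
  | nil => simp
  | cons s0 tl =>
    have hs0 : d < s0.length ∧ _ := pvF_mem_len (h ▸ List.mem_cons_self (l := tl))
    have hbeq : ((List.drop d s0).length == 2) = (s0.length == d + 2) := by
      rw [List.length_drop]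
      cases h2 : (s0.length == d + 2)
      · simp only [beq_eq_false_iff_ne, ne_eq] at h2 ⊢
        omega
      · simp only [beq_iff_eq] at h2 ⊢
        omega
    simp only [List.map_cons, hbeq]

lemma pvIsdigit_digitChar : ∀ i ∈ PySem.List.pyRange 0 10 1,
    PySem.Chars.isdigit (pvDigitChar i) = true := by decide

lemma pvPending_mem {group : List (List Char)} {d : Nat} {s : List Char}
    (hs : s ∈ pvPending group d) :
    ∃ c, PySem.List.pyGet? s (d : Int) = some c ∧ PySem.Chars.isdigit c = true := by
  have := List.of_mem_filter hs
  cases h : PySem.List.pyGet? s (d : Int) with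
  | none => rw [h] at this; simp at this
  | some c => rw [h] at this; exact ⟨c, rfl, this⟩

lemma pvCB_eq_zero {L : List (List Char)} {d : Nat} {i : Int}
    (h : pvF (pvDigitChar i) L d = []) : pvCB L d i = 0 := by
  simp [pvCB, h]

lemma pvCB_eq_cons {L : List (List Char)} {d : Nat} {i : Int} {s0 : List Char} {tl : List (List Char)}
    (h : pvF (pvDigitChar i) L d = s0 :: tl) :
    pvCB L d i = if s0.length == d + 2 then 1
                 else pvGfaA ((s0 :: tl).map (List.drop (d + 1))) := by
  simp [pvCB, h]

-- B's while-loop, expressed as A's sum over the ten digits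
lemma pvLoopSum (n : Nat)
    (IH : ∀ m, m < n → ∀ group d, pvMu group d ≤ m →
      pvGfaA (group.map (List.drop d)) = pvGfaB group d) :
    ∀ (k : Nat) (L : List (List Char)) (d : Nat) (total : Int), L.length ≤ k →
      pvMu L d ≤ n →
      (∀ s ∈ L, ∃ c, PySem.List.pyGet? s (d : Int) = some c ∧ PySem.Chars.isdigit c = true) →
      pvGfaBLoop L d total = total + (((PySem.List.pyRange 0 10 1).map (pvCB L d)).sum) := by
  intro k
  induction k with
  | zero =>
    intro L d total hk _ _
    have : L = [] := List.length_eq_zero_iff.mp (Nat.le_zero.mp hk)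
    subst this
    rw [pvGfaBLoop]
    have : ∀ i ∈ PySem.List.pyRange 0 10 1, pvCB [] d i = 0 := by
      intro i _; simp [pvCB, pvF]
    rw [List.map_congr_left this]
    simp
  | succ k ihk =>
    intro L d total hk hn hdig
    cases hL : L with
    | nil =>
      rw [pvGfaBLoop]
      have : ∀ i ∈ PySem.List.pyRange 0 10 1, pvCB [] d i = 0 := by
        intro i _; simp [pvCB, pvF]
      rw [List.map_congr_left this]
      simp
    | cons p0 t =>
      subst hL
      obtain ⟨c, hc, hcd⟩ := hdig p0 List.mem_cons_self
      obtain ⟨j, hj, hjc⟩ := pvIsdigit_exists hcd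
      have hc' : p0[d]? = some c := by rw [← PySem.List.pyGet?_natCast]; exact hc
      have hsame : (p0 :: t).filter (fun s => PySem.List.pyGet? s (d : Int) == some c)
          = p0 :: t.filter (fun s => PySem.List.pyGet? s (d : Int) == some c) := by
        simp [List.filter_cons, hc']
      have hrest : (p0 :: t).filter (fun s => !(PySem.List.pyGet? s (d : Int) == some c))
          = t.filter (fun s => !(PySem.List.pyGet? s (d : Int) == some c)) := by
        simp [List.filter_cons, hc']
      -- facts for the recursive call on rest
      have hrest_len : ((p0 :: t).filter (fun s => !(PySem.List.pyGet? s (d : Int) == some c))).length ≤ k := by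
        rw [hrest]
        have := List.length_filter_le (fun s => !(PySem.List.pyGet? s (d : Int) == some c)) t
        simp only [List.length_cons] at hk
        omega
      have hrest_mu : pvMu ((p0 :: t).filter (fun s => !(PySem.List.pyGet? s (d : Int) == some c))) d ≤ n :=
        le_trans (pvMu_filter_le _ _ _) hn
      have hrest_dig : ∀ s ∈ (p0 :: t).filter (fun s => !(PySem.List.pyGet? s (d : Int) == some c)),
          ∃ c', PySem.List.pyGet? s (d : Int) = some c' ∧ PySem.Chars.isdigit c' = true :=
        fun s hs => hdig s (List.mem_of_mem_filter hs)
      -- sum decomposition: digit j's group is `same`; every other digit's group survives in rest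
      have hsplit : (((PySem.List.pyRange 0 10 1).map (pvCB (p0 :: t) d)).sum)
          = pvCB (p0 :: t) d j
            + (((PySem.List.pyRange 0 10 1).map
                (pvCB ((p0 :: t).filter (fun s => !(PySem.List.pyGet? s (d : Int) == some c))) d)).sum) := by
        apply pvSumSplit _ _ _ (PySem.List.nodup_pyRange_one 0 10) j hj
        · -- no string with char c is left in rest
          have hFe : pvF (pvDigitChar j)
              ((p0 :: t).filter (fun s => !(PySem.List.pyGet? s (d : Int) == some c))) d = [] := by
            rw [hjc, pvF, List.filter_filter, List.filter_eq_nil_iff]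
            intro s _
            cases hg : PySem.List.pyGet? s (d : Int) == some c <;> simp [hg]
          exact pvCB_eq_zero hFe
        · intro i hi hij
          have hne : pvDigitChar i ≠ c := by
            rw [← hjc]
            exact fun he => hij (pvDigitChar_inj i hi j hj he)
          have hFi : pvF (pvDigitChar i)
              ((p0 :: t).filter (fun s => !(PySem.List.pyGet? s (d : Int) == some c))) d
              = pvF (pvDigitChar i) (p0 :: t) d := by
            rw [pvF]
            apply pvFilterFilter_of_imp
            intro s hs
            rw [beq_iff_eq] at hs
            simp [hs, hne]
          simp only [pvCB, hFi]
      -- the contribution of digit j is exactly the loop body's contribution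
      have hsameF : pvF (pvDigitChar j) (p0 :: t) d
          = p0 :: t.filter (fun s => PySem.List.pyGet? s (d : Int) == some c) := by
        rw [hjc, pvF, hsame]
      have hCBj : pvCB (p0 :: t) d j
          = if p0.length == d + 2 then 1
            else pvGfaA ((p0 :: t.filter (fun s => PySem.List.pyGet? s (d : Int) == some c)).map
              (List.drop (d + 1))) :=
        pvCB_eq_cons hsameF
      rw [pvGfaBLoop, hc]
      simp only [hsame]
      by_cases h2 : (p0.length == d + 2) = true
      · rw [if_pos h2]
        rw [ihk _ _ _ hrest_len hrest_mu hrest_dig, hsplit]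
        rw [hCBj, if_pos h2]
        ring
      · rw [Bool.not_eq_true] at h2
        rw [if_neg (by simp [h2])]
        rw [ihk _ _ _ hrest_len hrest_mu hrest_dig, hsplit]
        have hmu_same : pvMu ((p0 :: t).filter (fun s => PySem.List.pyGet? s (d : Int) == some c)) (d + 1)
            < pvMu (p0 :: t) d := pvMu_same_lt rfl hc
        have hIH := IH (pvMu ((p0 :: t).filter (fun s => PySem.List.pyGet? s (d : Int) == some c)) (d + 1))
          (lt_of_lt_of_le hmu_same hn) ((p0 :: t).filter (fun s => PySem.List.pyGet? s (d : Int) == some c))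
          (d + 1) le_rfl
        rw [hsame] at hIH
        rw [hCBj, if_neg (by simp [h2]), hIH]
        ring

theorem pvMainAux : ∀ (n : Nat) (group : List (List Char)) (d : Nat), pvMu group d ≤ n →
    pvGfaA (group.map (List.drop d)) = pvGfaB group d := by
  intro n
  induction n using Nat.strong_induction_on with
  | _ n IH =>
    intro group d hn
    have hmu : pvMu (pvPending group d) d ≤ n := by
      refine le_trans ?_ hn
      unfold pvPending
      exact pvMu_filter_le _ _ _
    have hdig := fun s hs => pvPending_mem (group := group) (d := d) (s := s) hs
    rw [pvGfaA_eq, pvGfaB,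
      pvLoopSum n IH (pvPending group d).length (pvPending group d) d 1 le_rfl hmu hdig]
    congr 2
    apply List.map_congr_left
    intro i hi
    exact pvCA_eq_pvCB hi group d (pvIsdigit_digitChar i hi)

theorem pvMain (group : List (List Char)) (d : Nat) :
    pvGfaA (group.map (List.drop d)) = pvGfaB group d :=
  pvMainAux (pvMu group d) group d le_rfl

-- ===== VERDICT (by name: the statement is the Claim_ definition above) =====
theorem getFaceAmount_spec : Claim_equal_getFaceAmount := by
  intro lst _ _
  unfold Spec_getFaceAmount getFaceAmount getFaceAmount_alt
  have := pvMain (lst.map String.toList) 0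
  simpa using this
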